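-- pv_equiv track=rewrite | github.com/pvarshney1729/DNAStorage | clustering.py | underlying_clustering
-- ===== SOURCE A (Python) =====
-- def underlying_clustering(pool, actual_num_strands, multiplier):
--     clusters = []
--     for i in range(0, actual_num_strands):
--         temp = []
--         for j in range(0, multiplier):
--             temp.append(pool[i + actual_num_strands*j])
--         clusters.append(temp)
--     return clusters
-- ===== SOURCE B (Python) =====
-- def underlying_clustering(pool, actual_num_strands, multiplier):
--     clusters = [[] for _ in range(actual_num_strands)]
--     for k in range(actual_num_strands * multiplier):
--         clusters[k % actual_num_strands].append(pool[k])
--     return clusters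
-- ===== Notes on version B (the rewrite author's own statement) =====
-- stated objective: alternative
-- what changed: B preallocates the clusters and scatters the pool in one sequential round-robin pass (clusters[k % n].append(pool[k])), instead of A's nested gather of strided elements per cluster.
-- outside the precondition, e.g. on underlying_clustering([], -1, -1): A returns [], B raises IndexError
import Mathlib
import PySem

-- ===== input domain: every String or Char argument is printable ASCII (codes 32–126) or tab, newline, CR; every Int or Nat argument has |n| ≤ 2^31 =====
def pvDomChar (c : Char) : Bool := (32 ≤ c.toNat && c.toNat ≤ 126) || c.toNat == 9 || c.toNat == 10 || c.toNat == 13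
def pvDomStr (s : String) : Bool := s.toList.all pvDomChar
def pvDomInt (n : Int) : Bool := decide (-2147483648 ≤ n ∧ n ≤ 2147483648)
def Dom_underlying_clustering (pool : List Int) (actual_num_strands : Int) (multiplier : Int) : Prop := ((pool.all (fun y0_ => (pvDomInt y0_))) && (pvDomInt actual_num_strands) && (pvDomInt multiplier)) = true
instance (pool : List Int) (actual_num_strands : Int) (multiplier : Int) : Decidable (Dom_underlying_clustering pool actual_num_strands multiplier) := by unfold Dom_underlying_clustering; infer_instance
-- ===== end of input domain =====

-- B replaces A's nested per-cluster gather of strided elements by a single sequential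
-- round-robin scatter pass over the pool (alternative decomposition, same cost).

-- ===== PORT A =====
def underlying_clustering (pool : List Int) (actual_num_strands : Int) (multiplier : Int) : List (List Int) :=
  (PySem.List.pyRange 0 actual_num_strands).foldl
    (fun clusters i =>
      clusters ++
        [(PySem.List.pyRange 0 multiplier).foldl
          (fun temp j => temp ++ [PySem.List.pyGetD pool (i + actual_num_strands * j) 0]) []])
    []

-- ===== PORT B =====
def underlying_clustering_alt (pool : List Int) (actual_num_strands : Int) (multiplier : Int) : List (List Int) :=
  (PySem.List.pyRange 0 (actual_num_strands * multiplier)).foldl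
    (fun clusters k =>
      PySem.List.pySetD clusters (PySem.Int.mod k actual_num_strands)
        (PySem.List.pyGetD clusters (PySem.Int.mod k actual_num_strands) [] ++
          [PySem.List.pyGetD pool k 0]))
    ((PySem.List.pyRange 0 actual_num_strands).map (fun _ => ([] : List Int)))

-- ===== PRECONDITION & SPEC =====
-- Pre_ excludes (a) pools too short for the strided reads, where A raises IndexError, and
-- (b) the degenerate inputs with both counts negative, where A returns [] but B's scatter
-- loop runs (n*m > 0) and itself raises IndexError on the empty cluster list.
def Pre_underlying_clustering (pool : List Int) (actual_num_strands : Int) (multiplier : Int) : Prop :=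
  (actual_num_strands < 0 → 0 ≤ multiplier) ∧
  (0 < actual_num_strands → 0 < multiplier → actual_num_strands * multiplier ≤ pool.length)
instance (pool : List Int) (actual_num_strands : Int) (multiplier : Int) : Decidable (Pre_underlying_clustering pool actual_num_strands multiplier) := by unfold Pre_underlying_clustering; infer_instance

def pvWitness_underlying_clustering : List Int × Int × Int := ([1, 2, 3, 4, 5, 6], 2, 3)

def Spec_underlying_clustering (pool : List Int) (actual_num_strands : Int) (multiplier : Int) (out : List (List Int)) : Prop := out = underlying_clustering_alt pool actual_num_strands multiplier
instance (pool : List Int) (actual_num_strands : Int) (multiplier : Int) (out : List (List Int)) : Decidable (Spec_underlying_clustering pool actual_num_strands multiplier out) := by unfold Spec_underlying_clustering; infer_instance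

-- ===== CLAIM (what is proved, stated in full; the proofs are below) =====
def Claim_equal_underlying_clustering : Prop := ∀ (pool : List Int) (actual_num_strands : Int) (multiplier : Int), Dom_underlying_clustering pool actual_num_strands multiplier → Pre_underlying_clustering pool actual_num_strands multiplier → Spec_underlying_clustering pool actual_num_strands multiplier (underlying_clustering pool actual_num_strands multiplier)

-- ===== LEMMAS AND PROOFS =====

-- Folding a step that only touches positions ≥ 1 leaves the head alone.
theorem pv_tailFold (g : Nat → Int) (ks : List Nat) : ∀ (x : List Int) (xs : List (List Int)),
    ks.foldl (fun a r => a.set (r + 1) (a.getD (r + 1) [] ++ [g (r + 1)])) (x :: xs)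
      = x :: ks.foldl (fun a r => a.set r (a.getD r [] ++ [g (r + 1)])) xs := by
  induction ks with
  | nil => intro x xs; rfl
  | cons r ks ih =>
      intro x xs
      simp only [List.foldl_cons, List.set_cons_succ, List.getD_cons_succ]
      exact ih x _

-- One round of the scatter loop appends one element to every cluster, in order.
theorem pv_blockFold (g : Nat → Int) : ∀ (acc : List (List Int)),
    (List.range acc.length).foldl (fun a r => a.set r (a.getD r [] ++ [g r])) acc
      = List.zipWith (fun c r => c ++ [g r]) acc (List.range acc.length) := by
  intro acc
  induction acc generalizing g with
  | nil => rfl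
  | cons c cs ih =>
      simp only [List.length_cons, List.range_succ_eq_map, List.foldl_cons, List.set_cons_zero,
        List.getD_cons_zero, List.foldl_map, List.zipWith_cons_cons, List.zipWith_map_right,
        Nat.succ_eq_add_one]
      rw [pv_tailFold g]
      exact congrArg _ (ih (fun r => g (r + 1)))

-- pv_blockFold with the length as an explicit parameter.
theorem pv_blockFold' (g : Nat → Int) (N : Nat) (acc : List (List Int)) (h : acc.length = N) :
    (List.range N).foldl (fun a r => a.set r (a.getD r [] ++ [g r])) acc
      = List.zipWith (fun c r => c ++ [g r]) acc (List.range N) := by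
  subst h; exact pv_blockFold g acc

-- The whole Nat-level scatter fold equals the strided gather.
theorem pv_scatter_eq (f : Nat → Int) (N : Nat) : ∀ (M : Nat),
    (List.range (N * M)).foldl
        (fun a k => a.set (k % N) (a.getD (k % N) [] ++ [f k])) (List.replicate N ([] : List Int))
      = (List.range N).map (fun i => (List.range M).map (fun j => f (i + N * j))) := by
  intro M
  induction M with
  | zero => simp
  | succ M ih =>
      rw [Nat.mul_succ, List.range_add, List.foldl_append, ih, List.foldl_map]
      refine .trans (PySem.List.foldl_congr_mem _ _
          (fun (a : List (List Int)) (r : Nat) => a.set r (a.getD r [] ++ [f (N * M + r)])) _ ?_) ?_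
      · intro a r hr
        rw [Nat.mul_add_mod, Nat.mod_eq_of_lt (List.mem_range.mp hr)]
      · rw [pv_blockFold' (fun r => f (N * M + r)) N _ (by simp),
          List.zipWith_map_left, List.zipWith_self]
        refine List.map_congr_left (fun i hi => ?_)
        rw [List.range_succ, List.map_append]
        simp [Nat.add_comm (N * M) i]

-- Port A at cast arguments equals the gather closed form.
theorem pv_a_char (pool : List Int) (N M : Nat) :
    underlying_clustering pool (N : Int) (M : Int)
      = (List.range N).map (fun i => (List.range M).map (fun j => pool.getD (i + N * j) 0)) := by
  unfold underlying_clustering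
  simp only [PySem.List.pyRange_one, Int.sub_zero, Int.toNat_natCast, zero_add, List.foldl_map,
    PySem.List.foldl_append_singleton_eq_map, List.nil_append]
  refine List.map_congr_left (fun i _ => ?_)
  refine List.map_congr_left (fun j _ => ?_)
  rw [show ((i : Int) + (N : Int) * (j : Int)) = ((i + N * j : Nat) : Int) by push_cast; ring]
  exact PySem.List.pyGetD_natCast pool (i + N * j) 0

-- Port B at cast arguments equals the same closed form.
theorem pv_alt_char (pool : List Int) (N M : Nat) :
    underlying_clustering_alt pool (N : Int) (M : Int)
      = (List.range N).map (fun i => (List.range M).map (fun j => pool.getD (i + N * j) 0)) := by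
  unfold underlying_clustering_alt
  rw [show ((N : Int) * (M : Int)) = ((N * M : Nat) : Int) by push_cast; ring]
  simp only [PySem.List.pyRange_one, Int.sub_zero, Int.toNat_natCast, zero_add, List.foldl_map,
    List.map_map, Function.comp_def]
  rw [show (List.range N).map (fun _ => ([] : List Int)) = List.replicate N ([] : List Int) by simp]
  refine .trans (PySem.List.foldl_congr_mem _ _
      (fun (a : List (List Int)) (k : Nat) => a.set (k % N) (a.getD (k % N) [] ++ [pool.getD k 0]))
      _ ?_) (pv_scatter_eq (fun k => pool.getD k 0) N M)
  intro a k _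
  rw [PySem.Int.mod_natCast, PySem.List.pySetD_natCast, PySem.List.pyGetD_natCast,
    PySem.List.pyGetD_natCast]

-- ===== VERDICT (by name: the statement is the Claim_ definition above) =====
theorem underlying_clustering_spec : Claim_equal_underlying_clustering := by
  intro pool n m _ hpre
  unfold Spec_underlying_clustering
  rcases lt_or_ge n 0 with hn | hn
  · -- n < 0: Pre gives 0 ≤ m, both sides are []
    have hm : 0 ≤ m := hpre.1 hn
    have hnm : n * m ≤ 0 := mul_nonpos_of_nonpos_of_nonneg (le_of_lt hn) hm
    unfold underlying_clustering underlying_clustering_alt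
    rw [PySem.List.pyRange_one_eq_nil (le_of_lt hn), PySem.List.pyRange_one_eq_nil hnm]
    rfl
  · rcases lt_or_ge m 0 with hm | hm
    · rcases eq_or_lt_of_le hn with hn0 | hn0
      · -- n = 0: both loops are empty
        unfold underlying_clustering underlying_clustering_alt
        rw [← hn0, zero_mul]
        simp only [PySem.List.pyRange_one_eq_nil (le_refl (0 : Int))]
        rfl
      · -- 0 < n, m < 0: A's inner loop is empty, B's scatter loop is empty
        have hnm : n * m < 0 := mul_neg_of_pos_of_neg hn0 hm
        unfold underlying_clustering underlying_clustering_alt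
        rw [PySem.List.pyRange_one_eq_nil (le_of_lt hm),
          PySem.List.pyRange_one_eq_nil (le_of_lt hnm)]
        simp
    · -- 0 ≤ n, 0 ≤ m: both equal the gather closed form
      lift n to ℕ using hn with N
      lift m to ℕ using hm with M
      rw [pv_a_char, pv_alt_char]
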